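-- pv_equiv track=rewrite | github.com/JeWeiLin/test | test.py | detectFirstAnomaly
-- ===== SOURCE A (Python) =====
-- def detectFirstAnomaly(metrics):
--     if len(metrics) < 2:
--         return -1
--
--     max_elements = metrics[0]
--
--     for i, val in enumerate(metrics[1:], start=1):
--         if val >= 3 * max_elements:
--             return i
--         if val > max_elements:
--             max_elements = val
--
--     return -1
-- ===== SOURCE B (Python) =====
-- def detectFirstAnomaly(metrics):
--     # Build the prefix-maximum table first, then scan it in a second pass.
--     if len(metrics) < 2:
--         return -1
--     prefmax = metrics[:1]
--     for v in metrics[1:]: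
--         prefmax.append(max(prefmax[-1], v))
--     for i, (v, pm) in enumerate(zip(metrics[1:], prefmax), start=1):
--         if v >= 3 * pm:
--             return i
--     return -1
-- ===== Notes on version B (the rewrite author's own statement) =====
-- stated objective: alternative
-- what changed: A's single interleaved pass (check-then-update-running-max with early return) is replaced by a two-phase decomposition: first build the full prefix-maximum table, then a separate scan of metrics[1:] zipped with that table finds the first index with value >= 3*prefmax[i-1].
import Mathlib
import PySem

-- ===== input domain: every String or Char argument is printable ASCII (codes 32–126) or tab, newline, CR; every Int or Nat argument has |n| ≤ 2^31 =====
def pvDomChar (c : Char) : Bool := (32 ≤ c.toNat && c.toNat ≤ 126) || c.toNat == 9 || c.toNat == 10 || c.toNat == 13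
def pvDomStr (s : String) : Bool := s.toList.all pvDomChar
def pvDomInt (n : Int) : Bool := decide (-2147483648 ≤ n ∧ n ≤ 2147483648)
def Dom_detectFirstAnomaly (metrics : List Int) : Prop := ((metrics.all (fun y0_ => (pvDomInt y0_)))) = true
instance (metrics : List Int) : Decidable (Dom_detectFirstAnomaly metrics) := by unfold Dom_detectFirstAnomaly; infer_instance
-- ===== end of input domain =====

-- B replaces A's interleaved single pass by a prefix-maximum table built first, then a separate scan (alternative decomposition, same cost).


-- ===== PORT A =====
-- the loop: for i, val in enumerate(metrics[1:], start=1): early return, else update running max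
def pvALoop (l : List Int) (i : Int) (maxElements : Int) : Int :=
  match l with
  | [] => -1
  | v :: rest =>
      if v ≥ 3 * maxElements then i
      else pvALoop rest (i + 1) (if v > maxElements then v else maxElements)

def detectFirstAnomaly (metrics : List Int) : Int :=
  if metrics.length < 2 then -1
  else
    match metrics with
    | [] => -1
    | h :: t => pvALoop t 1 h

-- ===== PORT B =====
-- phase 1: prefmax table (prefmax.append(max(prefmax[-1], v)))
def pvBuildPref (m : Int) (l : List Int) : List Int :=
  match l with
  | [] => []
  | v :: rest => max m v :: pvBuildPref (max m v) rest

-- phase 2: scan of enumerate(zip(metrics[1:], prefmax), start=1)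
def pvBScan (i : Int) (l : List (Int × Int)) : Int :=
  match l with
  | [] => -1
  | (v, pm) :: rest => if v ≥ 3 * pm then i else pvBScan (i + 1) rest

def detectFirstAnomaly_alt (metrics : List Int) : Int :=
  if metrics.length < 2 then -1
  else
    match metrics with
    | [] => -1
    | h :: t => pvBScan 1 (t.zip (h :: pvBuildPref h t))

-- ===== PRECONDITION & SPEC =====
def Spec_detectFirstAnomaly (metrics : List Int) (out : Int) : Prop := out = detectFirstAnomaly_alt metrics
instance (metrics : List Int) (out : Int) : Decidable (Spec_detectFirstAnomaly metrics out) := by unfold Spec_detectFirstAnomaly; infer_instance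

-- ===== CLAIM (what is proved, stated in full; the proofs are below) =====
def Claim_equal_detectFirstAnomaly : Prop := ∀ (metrics : List Int), Dom_detectFirstAnomaly metrics → Spec_detectFirstAnomaly metrics (detectFirstAnomaly metrics)

-- ===== LEMMAS AND PROOFS =====
lemma pvLoop_eq (t : List Int) : ∀ (i m : Int),
    pvALoop t i m = pvBScan i (t.zip (m :: pvBuildPref m t)) := by
  induction t with
  | nil => intro i m; rfl
  | cons v rest ih =>
      intro i m
      simp only [pvALoop, pvBuildPref, List.zip]
      by_cases h : v ≥ 3 * m
      · simp [pvBScan, h]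
      · have hmax : (if v > m then v else m) = max m v := by
          split_ifs with h1 <;> omega
        simp [pvBScan, h, hmax, ih, List.zip]

-- ===== VERDICT (by name: the statement is the Claim_ definition above) =====
theorem detectFirstAnomaly_spec : Claim_equal_detectFirstAnomaly := by
  intro metrics _
  unfold Spec_detectFirstAnomaly detectFirstAnomaly detectFirstAnomaly_alt
  cases metrics with
  | nil => rfl
  | cons h t => by_cases hl : (h :: t).length < 2 <;> simp [pvLoop_eq]
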